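-- pv_equiv track=rewrite | github.com/rievanaverilllio/text2sql-cot | resoning_and_inference/01-query_under_standing_15122025.py | _prioritize_candidates
-- ===== SOURCE A (Python) =====
-- from typing import Any, Dict, Iterable, List, Optional, Sequence
--
-- def _prioritize_candidates(candidates: List[str], priority_tables: set[str]) -> List[str]:
--     if not priority_tables:
--         return candidates
--     preferred, others = [], []
--     for candidate in candidates:
--         table = candidate.split(".", 1)[0] if "." in candidate else ""
--         (preferred if table in priority_tables else others).append(candidate)
--     return preferred + others
-- ===== SOURCE B (Python) =====
-- def _prioritize_candidates(candidates, priority_tables):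
--     if not priority_tables:
--         return candidates
--     return sorted(
--         candidates,
--         key=lambda c: 0 if (c.split(".", 1)[0] if "." in c else "") in priority_tables else 1,
--     )
-- ===== Notes on version B (the rewrite author's own statement) =====
-- stated objective: idiomatic
-- what changed: Replaces the explicit two-accumulator partition loop plus concatenation with a single stable sort keyed 0/1 on whether the candidate's table is a priority table; stability reproduces the partition order exactly.
import Mathlib
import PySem

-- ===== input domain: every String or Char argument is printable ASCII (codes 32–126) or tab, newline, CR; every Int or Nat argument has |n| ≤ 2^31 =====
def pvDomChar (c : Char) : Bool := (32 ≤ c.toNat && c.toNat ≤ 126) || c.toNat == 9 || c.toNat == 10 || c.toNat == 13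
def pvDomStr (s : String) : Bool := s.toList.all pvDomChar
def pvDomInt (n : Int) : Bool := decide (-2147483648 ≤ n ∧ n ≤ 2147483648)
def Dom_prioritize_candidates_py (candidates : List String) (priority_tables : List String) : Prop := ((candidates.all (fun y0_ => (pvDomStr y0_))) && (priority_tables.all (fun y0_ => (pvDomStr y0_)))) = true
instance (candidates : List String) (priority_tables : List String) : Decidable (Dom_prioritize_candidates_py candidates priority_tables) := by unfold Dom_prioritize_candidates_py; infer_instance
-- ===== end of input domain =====

-- B replaces A's two-accumulator partition loop by one stable sort with a 0/1 key (idiomatic; same values).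

-- shared helper: `candidate.split(".", 1)[0] if "." in candidate else ""` — both Pythons contain this
-- exact expression.  `split(".", 1)` never returns an empty list, so `[0]` never raises; `headD ""` is exact.
def pvTableOf (c : String) : String :=
  if PySem.Str.isIn "." c then ((PySem.Str.splitMax? c "." 1).getD []).headD "" else ""

-- ===== PORT A =====
def prioritize_candidates_py (candidates : List String) (priority_tables : List String) : List String :=
  if priority_tables = [] then candidates
  else
    let po := candidates.foldl
      (fun (acc : List String × List String) candidate =>
        if pvTableOf candidate ∈ priority_tables then (acc.1 ++ [candidate], acc.2)
        else (acc.1, acc.2 ++ [candidate]))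
      ([], [])
    po.1 ++ po.2

-- ===== PORT B =====
def prioritize_candidates_py_alt (candidates : List String) (priority_tables : List String) : List String :=
  if priority_tables = [] then candidates
  else PySem.List.sorted candidates (fun c => if pvTableOf c ∈ priority_tables then (0 : Int) else 1) false

-- ===== PRECONDITION & SPEC =====
def Spec_prioritize_candidates_py (candidates : List String) (priority_tables : List String) (out : List String) : Prop := out = prioritize_candidates_py_alt candidates priority_tables
instance (candidates : List String) (priority_tables : List String) (out : List String) : Decidable (Spec_prioritize_candidates_py candidates priority_tables out) := by unfold Spec_prioritize_candidates_py; infer_instance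

-- ===== CLAIM (what is proved, stated in full; the proofs are below) =====
def Claim_equal_prioritize_candidates_py : Prop := ∀ (candidates : List String) (priority_tables : List String), Dom_prioritize_candidates_py candidates priority_tables → Spec_prioritize_candidates_py candidates priority_tables (prioritize_candidates_py candidates priority_tables)

-- ===== LEMMAS AND PROOFS =====

-- inserting x past a block every element of which x does not go before
theorem pvInsertBy_skip {α : Type} (b : α → α → Bool) (x : α) (P O : List α)
    (h : ∀ y ∈ P, b x y = false) :
    PySem.List.insertBy b x (P ++ O) = P ++ PySem.List.insertBy b x O := by
  induction P with
  | nil => rfl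
  | cons y P ih =>
      simp only [List.cons_append, PySem.List.insertBy]
      rw [h y (by simp)]
      exact congrArg (y :: ·) (ih (fun z hz => h z (by simp [hz])))

-- main invariant of insertion sort with a 0/1 key against the partition loop
theorem pvInvariant (pt : List String) :
    ∀ (xs P O : List String),
      (∀ y ∈ P, pvTableOf y ∈ pt) → (∀ y ∈ O, pvTableOf y ∉ pt) →
      xs.foldl
        (fun acc x => PySem.List.insertBy
          (fun a b => decide ((if pvTableOf a ∈ pt then (0 : Int) else 1) < (if pvTableOf b ∈ pt then (0 : Int) else 1))) x acc)
        (P ++ O)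
      = (xs.foldl
          (fun (acc : List String × List String) candidate =>
            if pvTableOf candidate ∈ pt then (acc.1 ++ [candidate], acc.2)
            else (acc.1, acc.2 ++ [candidate])) (P, O)).1
        ++ (xs.foldl
          (fun (acc : List String × List String) candidate =>
            if pvTableOf candidate ∈ pt then (acc.1 ++ [candidate], acc.2)
            else (acc.1, acc.2 ++ [candidate])) (P, O)).2 := by
  intro xs
  induction xs with
  | nil => intro P O _ _; rfl
  | cons x xs ih =>
      intro P O hP hO
      simp only [List.foldl_cons]
      by_cases hx : pvTableOf x ∈ pt
      · -- key x = 0: x is inserted after P (all key 0) and before O (all key 1)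
        have hins : PySem.List.insertBy
            (fun a b => decide ((if pvTableOf a ∈ pt then (0 : Int) else 1) < (if pvTableOf b ∈ pt then (0 : Int) else 1))) x (P ++ O)
            = (P ++ [x]) ++ O := by
          rw [pvInsertBy_skip _ _ P O (fun y hy => by simp [hx, hP y hy])]
          cases O with
          | nil => simp [PySem.List.insertBy]
          | cons z O =>
              have hz : pvTableOf z ∉ pt := hO z (by simp)
              simp only [PySem.List.insertBy]
              simp [hx, hz]
        rw [hins, if_pos hx]
        exact ih (P ++ [x]) O
          (fun y hy => by rcases List.mem_append.mp hy with h | h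
                          · exact hP y h
                          · simp at h; subst h; exact hx)
          hO
      · -- key x = 1: x never goes before anything, so it is appended at the end
        have hins : PySem.List.insertBy
            (fun a b => decide ((if pvTableOf a ∈ pt then (0 : Int) else 1) < (if pvTableOf b ∈ pt then (0 : Int) else 1))) x (P ++ O)
            = P ++ (O ++ [x]) := by
          rw [PySem.List.insertBy_of_forall_not_before _ _ _
            (fun y _ => by by_cases hy : pvTableOf y ∈ pt <;> simp [hx, hy])]
          simp
        rw [hins, if_neg hx]
        exact ih P (O ++ [x]) hP
          (fun y hy => by rcases List.mem_append.mp hy with h | h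
                          · exact hO y h
                          · simp at h; subst h; exact hx)

-- ===== VERDICT (by name: the statement is the Claim_ definition above) =====
theorem prioritize_candidates_py_spec : Claim_equal_prioritize_candidates_py := by
  intro candidates pt _
  unfold Spec_prioritize_candidates_py prioritize_candidates_py prioritize_candidates_py_alt
  by_cases hpt : pt = []
  · simp [hpt]
  · simp only [if_neg hpt]
    rw [PySem.List.sorted_eq_foldl_insertBy]
    have := pvInvariant pt candidates [] [] (by simp) (by simp)
    simpa using this.symm
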